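-- pv_equiv track=rewrite | github.com/manwar/perlweeklychallenge-club | challenge-343/sgreen/python/ch-2.py | champion_team
-- ===== SOURCE A (Python) =====
-- def champion_team(matrix: list[list[int]], consider_teams: list[int]|None = None) -> str:
--     """
--     Determine the champion team from a results matrix.
--
--     Input: A square matrix of 0s and 1s representing the strengths of teams.
--
--     Returns: The champion team as a string, or "No champion" if there is a tie.
--     """
--     # Check the matrix is a square
--     size = len(matrix)
--     if any(len(row) != size for row in matrix):
--         raise ValueError("Matrix must be square")
--
--     # Check the matrix only contains only 0s and 1s
--     if any(matrix[i][j] not in (0, 1) for i in range(size) for j in range(size)):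
--         raise ValueError("Matrix must only contain 0s and 1s")
--
--     # Check a team does not win against itself
--     if any(matrix[i][i] != 0 for i in range(size)):
--         raise ValueError("A team cannot win against itself")
--
--     # Consider all teams by default
--     if consider_teams is None:
--         consider_teams = list(range(len(matrix)))
--
--     max_wins = -1
--     winning_teams = []
--
--     for team_index, results in enumerate(matrix):
--         # Skip teams we don't need to look at
--         if team_index not in consider_teams:
--             continue
--
--         # Find the wins for this team against other teams being considered
--         wins = sum(results[i] for i in consider_teams)
--
--         # If it is the best so far, update our records
--         if wins > max_wins:
--             max_wins = wins
--             winning_teams = [team_index]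
--         elif wins == max_wins:
--             winning_teams.append(team_index)
--
--     if len(winning_teams) == 1:
--         # We have one winner
--         return f"Team {winning_teams[0]}"
--
--     if len(winning_teams) == len(consider_teams):
--         # There is a tie between two or more teams
--         return "No champion"
--
--     # Call the function recursively to break the tie
--     return champion_team(matrix, consider_teams=winning_teams)
-- ===== SOURCE B (Python) =====
-- def champion_team(matrix: list[list[int]], consider_teams: list[int] | None = None) -> str:
--     """Iterative re-implementation: validate once, then narrow the considered
--     set in a while loop via per-team score pairs, max and filter."""
--     size = len(matrix)
--     if any(len(row) != size for row in matrix):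
--         raise ValueError("Matrix must be square")
--     for i in range(size):
--         for j in range(size):
--             if matrix[i][j] not in (0, 1):
--                 raise ValueError("Matrix must only contain 0s and 1s")
--         if matrix[i][i] != 0:
--             raise ValueError("A team cannot win against itself")
--
--     consider = consider_teams if consider_teams is not None else list(range(size))
--     while True:
--         scores = [(t, sum(matrix[t][i] for i in consider))
--                   for t in range(size) if t in consider]
--         if not scores:
--             return "No champion"
--         best = max(w for _, w in scores)
--         winning = [t for t, w in scores if w == best]
--         if len(winning) == 1:
--             return f"Team {winning[0]}"
--         if len(winning) == len(consider):
--             return "No champion"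
--         consider = winning
-- ===== Notes on version B (the rewrite author's own statement) =====
-- stated objective: simpler
-- what changed: A's tail recursion with a running (max_wins, winning_teams) accumulator threaded through recursive calls (re-validating the matrix each call) is replaced by a single up-front validation and a while loop that builds per-team (team, wins) score pairs, takes the max, and filters the candidates attaining it.
import Mathlib
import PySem

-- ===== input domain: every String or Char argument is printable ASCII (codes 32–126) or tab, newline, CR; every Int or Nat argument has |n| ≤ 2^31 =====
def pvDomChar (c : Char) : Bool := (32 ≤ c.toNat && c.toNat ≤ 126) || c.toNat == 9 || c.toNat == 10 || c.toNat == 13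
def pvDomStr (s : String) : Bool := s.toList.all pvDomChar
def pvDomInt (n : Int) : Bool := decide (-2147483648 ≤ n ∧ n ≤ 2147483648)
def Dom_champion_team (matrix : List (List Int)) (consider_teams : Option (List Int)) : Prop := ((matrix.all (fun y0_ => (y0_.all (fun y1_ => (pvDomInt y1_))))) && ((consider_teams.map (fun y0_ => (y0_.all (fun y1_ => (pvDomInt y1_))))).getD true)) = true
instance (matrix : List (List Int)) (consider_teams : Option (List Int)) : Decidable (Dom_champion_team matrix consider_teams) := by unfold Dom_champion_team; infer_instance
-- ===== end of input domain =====

-- B replaces A's tail recursion and running max/append accumulator by a while loop over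
-- (team, wins) score pairs with max-then-filter; objective: simpler/alternative decomposition.

-- ===== PORT A =====
-- one round of A: the enumerate-fold with running (max_wins, winning_teams), then the
-- three-way exit; the recursive call 'champion_team(matrix, winning_teams)' re-runs the
-- validation, so the checks live inside the loop body, exactly as in A.  fuel makes the
-- recursion structural; fuel = len(consider)+1 suffices (winning shrinks strictly).
def championGoA (matrix : List (List Int)) : Nat → List Int → String
  | 0, _ => ""
  | fuel + 1, consider =>
    -- `raise ValueError` paths: Pre_ excludes them; the port returns "" there
    if matrix.any (fun row => decide (row.length ≠ matrix.length)) then ""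
    else if (List.range matrix.length).any (fun i => (List.range matrix.length).any
        (fun j => !(PySem.List.pyGetD (PySem.List.pyGetD matrix (i : Int) []) (j : Int) 0 == 0 ||
                    PySem.List.pyGetD (PySem.List.pyGetD matrix (i : Int) []) (j : Int) 0 == 1))) then ""
    else if (List.range matrix.length).any
        (fun i => decide (PySem.List.pyGetD (PySem.List.pyGetD matrix (i : Int) []) (i : Int) 0 ≠ 0)) then ""
    else
      let st := (PySem.List.enumerate matrix).foldl
        (fun (st : Int × List Int) p =>
          if !(consider.contains p.1) then st
          else
            let wins := consider.foldl (fun acc i => acc + PySem.List.pyGetD p.2 i 0) 0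
            if wins > st.1 then (wins, [p.1])
            else if wins = st.1 then (st.1, st.2 ++ [p.1])
            else st)
        (-1, [])
      if st.2.length = 1 then "Team " ++ PySem.Int.toStr (PySem.List.pyGetD st.2 0 0)
      else if st.2.length = consider.length then "No champion"
      else championGoA matrix fuel st.2

def champion_team (matrix : List (List Int)) (consider_teams : Option (List Int)) : String :=
  let consider := match consider_teams with
    | some l => l
    | none => PySem.List.pyRange 0 matrix.length
  championGoA matrix (consider.length + 1) consider

-- ===== PORT B =====
-- one round of B's `while True` loop: build scores, max, filter, exit or narrow.
def championGoB (matrix : List (List Int)) : Nat → List Int → String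
  | 0, _ => ""
  | fuel + 1, consider =>
    let scores := ((PySem.List.pyRange 0 matrix.length).filter
        (fun t => consider.contains t)).map
      (fun t => (t, consider.foldl
        (fun acc i => acc + PySem.List.pyGetD (PySem.List.pyGetD matrix t []) i 0) 0))
    if scores = [] then "No champion"
    else
      let best := (PySem.List.max? (scores.map (fun p => p.2)) (fun y => y)).getD 0
      let winning := (scores.filter (fun p => decide (p.2 = best))).map (fun p => p.1)
      if winning.length = 1 then "Team " ++ PySem.Int.toStr (PySem.List.pyGetD winning 0 0)
      else if winning.length = consider.length then "No champion"
      else championGoB matrix fuel winning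

def champion_team_alt (matrix : List (List Int)) (consider_teams : Option (List Int)) : String :=
  -- validation once, up front (B's nested-loop shape)
  if matrix.any (fun row => decide (row.length ≠ matrix.length)) then ""
  else if !(List.range matrix.length).all (fun i =>
      (List.range matrix.length).all (fun j =>
        PySem.List.pyGetD (PySem.List.pyGetD matrix (i : Int) []) (j : Int) 0 == 0 ||
        PySem.List.pyGetD (PySem.List.pyGetD matrix (i : Int) []) (j : Int) 0 == 1) &&
      PySem.List.pyGetD (PySem.List.pyGetD matrix (i : Int) []) (i : Int) 0 == 0) then ""
  else
    let consider := match consider_teams with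
      | some l => l
      | none => PySem.List.pyRange 0 matrix.length
    championGoB matrix (consider.length + 1) consider

-- ===== PRECONDITION & SPEC =====
-- Pre_ excludes exactly the inputs on which Python A raises: a non-square matrix, an entry
-- other than 0/1, a non-zero diagonal entry (ValueError), and a consider_teams list that
-- contains some real team index together with an index outside [-size, size) (IndexError
-- in the wins sum).  A returns on everything else, including negative in-range indices.
def Pre_champion_team (matrix : List (List Int)) (consider_teams : Option (List Int)) : Prop :=
  (∀ row ∈ matrix, row.length = matrix.length) ∧
  (∀ row ∈ matrix, ∀ v ∈ row, v = 0 ∨ v = 1) ∧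
  (∀ i < matrix.length, (matrix.getD i []).getD i 0 = 0) ∧
  (match consider_teams with
   | none => True
   | some l => (∀ x ∈ l, -(matrix.length : Int) ≤ x ∧ x < (matrix.length : Int)) ∨
               (∀ x ∈ l, ¬(0 ≤ x ∧ x < (matrix.length : Int))))
instance (matrix : List (List Int)) (consider_teams : Option (List Int)) : Decidable (Pre_champion_team matrix consider_teams) := by unfold Pre_champion_team; cases consider_teams <;> infer_instance

def pvWitness_champion_team : List (List Int) × Option (List Int) := ([[0, 1], [0, 0]], none)

def Spec_champion_team (matrix : List (List Int)) (consider_teams : Option (List Int)) (out : String) : Prop := out = champion_team_alt matrix consider_teams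
instance (matrix : List (List Int)) (consider_teams : Option (List Int)) (out : String) : Decidable (Spec_champion_team matrix consider_teams out) := by unfold Spec_champion_team; infer_instance

-- ===== CLAIM (what is proved, stated in full; the proofs are below) =====
def Claim_equal_champion_team : Prop := ∀ (matrix : List (List Int)) (consider_teams : Option (List Int)), Dom_champion_team matrix consider_teams → Pre_champion_team matrix consider_teams → Spec_champion_team matrix consider_teams (champion_team matrix consider_teams)

-- ===== LEMMAS AND PROOFS =====

-- matrix validity: the three conjuncts of Pre_ that both ports check
def pvValid (matrix : List (List Int)) : Prop :=
  (∀ row ∈ matrix, row.length = matrix.length) ∧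
  (∀ row ∈ matrix, ∀ v ∈ row, v = 0 ∨ v = 1) ∧
  (∀ i < matrix.length, (matrix.getD i []).getD i 0 = 0)

-- the wins score of team t against the considered list (shared shape of both ports' inner sum)
def pvWinsOf (matrix : List (List Int)) (consider : List Int) (t : Int) : Int :=
  consider.foldl (fun acc i => acc + PySem.List.pyGetD (PySem.List.pyGetD matrix t []) i 0) 0

-- the candidate teams of one round, in index order
def pvCandOf (matrix : List (List Int)) (consider : List Int) : List Int :=
  (PySem.List.pyRange 0 matrix.length).filter (fun t => consider.contains t)

lemma pvEntry_nonneg (matrix : List (List Int)) (hv : pvValid matrix) (t i : Int) :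
    0 ≤ PySem.List.pyGetD (PySem.List.pyGetD matrix t []) i 0 := by
  have hd : ∀ (xs : List (List Int)) (j : Int), PySem.List.pyGetD xs j ([] : List Int) = (PySem.List.pyGet? xs j).getD [] := by
    intro xs j; simp [PySem.List.pyGetD]
  have hd2 : ∀ (xs : List Int) (j : Int), PySem.List.pyGetD xs j (0 : Int) = (PySem.List.pyGet? xs j).getD 0 := by
    intro xs j; simp [PySem.List.pyGetD]
  rw [hd, hd2]
  rcases hrow : PySem.List.pyGet? matrix t with _ | row
  · simp [PySem.List.pyGet?]
  · have hrm : row ∈ matrix := PySem.List.mem_of_pyGet?_eq_some matrix hrow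
    rcases hv2 : PySem.List.pyGet? row i with _ | v
    · simp [hv2]
    · have hvm : v ∈ row := PySem.List.mem_of_pyGet?_eq_some row hv2
      rcases hv.2.1 row hrm v hvm with h | h <;> simp [hv2, h]

lemma pvFoldl_add_le (f : Int → Int) (hf : ∀ i, 0 ≤ f i) :
    ∀ (l : List Int) (acc : Int), acc ≤ l.foldl (fun a i => a + f i) acc := by
  intro l
  induction l with
  | nil => intro acc; exact le_refl _
  | cons x xs ih =>
    intro acc
    have := ih (acc + f x)
    have hx := hf x
    simp only [List.foldl_cons]
    omega

lemma pvWinsOf_nonneg (matrix : List (List Int)) (hv : pvValid matrix)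
    (consider : List Int) (t : Int) : 0 ≤ pvWinsOf matrix consider t := by
  unfold pvWinsOf
  exact pvFoldl_add_le _ (fun i => pvEntry_nonneg matrix hv t i) consider 0

-- the running-(max, argmax-list) fold equals "max then filter"
lemma pvArgmax_fold (w : Int → Int) (L : List Int) (hL : L ≠ []) (h0 : ∀ t ∈ L, 0 ≤ w t) :
    L.foldl (fun (s : Int × List Int) j =>
        if w j > s.1 then (w j, [j]) else if w j = s.1 then (s.1, s.2 ++ [j]) else s) (-1, []) =
      ((PySem.List.max? (L.map w) (fun y => y)).getD 0,
        L.filter (fun t => decide (w t = (PySem.List.max? (L.map w) (fun y => y)).getD 0))) := by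
  induction L using List.reverseRecOn with
  | nil => exact absurd rfl hL
  | append_singleton L' t ih =>
    by_cases hL' : L' = []
    · subst hL'
      have ht0 : 0 ≤ w t := h0 t (by simp)
      simp only [List.nil_append, List.foldl_cons, List.foldl_nil, List.map_cons, List.map_nil,
        PySem.List.max?_id_cons, List.filter_cons, List.filter_nil]
      rw [if_pos (by omega : w t > (-1 : Int))]
      simp
    · have ih' := ih hL' (fun x hx => h0 x (by simp [hx]))
      rw [List.foldl_append, ih']
      obtain ⟨x, rest, hxr⟩ := List.exists_cons_of_ne_nil (fun h => hL' (List.map_eq_nil_iff.mp h) : L'.map w ≠ [])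
      have hmax' : PySem.List.max? (L'.map w) (fun y => y) = some (rest.foldl max x) := by
        rw [hxr]; exact PySem.List.max?_id_cons x rest
      have hmaxT : PySem.List.max? ((L' ++ [t]).map w) (fun y => y) = some (max (rest.foldl max x) (w t)) := by
        rw [List.map_append, hxr]
        simp only [List.map_cons, List.map_nil, List.cons_append, PySem.List.max?_id_cons, List.foldl_append,
          List.foldl_cons, List.foldl_nil]
      set M' : Int := rest.foldl max x with hM'
      have hub : ∀ y ∈ L', w y ≤ M' := by
        intro y hy
        have := PySem.List.max?_isMax hmax' (w y) (List.mem_map_of_mem hy)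
        simpa using this
      rw [hmax', hmaxT]
      simp only [Option.getD_some, List.foldl_cons, List.foldl_nil, List.filter_append,
        List.filter_cons, List.filter_nil]
      rcases lt_trichotomy M' (w t) with hgt | heq | hlt
      · rw [if_pos (by omega : w t > M')]
        have hmx : max M' (w t) = w t := max_eq_right (le_of_lt hgt)
        rw [hmx]
        simp [List.filter_eq_nil_iff]
        intro a ha
        have := hub a ha
        omega
      · rw [if_neg (by omega : ¬ w t > M'), if_pos heq.symm]
        have hmx : max M' (w t) = M' := by omega
        rw [hmx]
        simp [heq]
      · rw [if_neg (by omega : ¬ w t > M'), if_neg (by omega : ¬ w t = M')]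
        have hmx : max M' (w t) = M' := by omega
        rw [hmx]
        split_ifs with hc
        · exfalso
          have : w t = M' := by simpa using hc
          omega
        · simp

-- A's skip-or-update fold over enumerate(matrix) is the same fold over the candidate list
lemma pvFoldA_eq (matrix : List (List Int)) (consider : List Int) :
    (PySem.List.enumerate matrix).foldl
        (fun (st : Int × List Int) p =>
          if !(consider.contains p.1) then st
          else
            let wins := consider.foldl (fun acc i => acc + PySem.List.pyGetD p.2 i 0) 0
            if wins > st.1 then (wins, [p.1])
            else if wins = st.1 then (st.1, st.2 ++ [p.1])
            else st) (-1, []) =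
      (pvCandOf matrix consider).foldl
        (fun (s : Int × List Int) j =>
          if pvWinsOf matrix consider j > s.1 then (pvWinsOf matrix consider j, [j])
          else if pvWinsOf matrix consider j = s.1 then (s.1, s.2 ++ [j])
          else s) (-1, []) := by
  rw [PySem.List.enumerate_eq_map_pyRange matrix ([] : List Int), List.foldl_map]
  unfold pvCandOf
  rw [List.foldl_filter]
  apply List.foldl_ext
  intro s j _
  cases h : consider.contains j <;> simp only [pvWinsOf, Bool.not_true, Bool.not_false,
    if_true] <;> rfl

lemma pvLength_le_of_nodup_subset (l1 l2 : List Int) (h1 : l1.Nodup) (hsub : ∀ x ∈ l1, x ∈ l2) :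
    l1.length ≤ l2.length := by
  calc l1.length = l1.toFinset.card := (List.toFinset_card_of_nodup h1).symm
    _ ≤ l2.toFinset.card := Finset.card_le_card (fun x hx => by
        simp only [List.mem_toFinset] at hx ⊢; exact hsub x hx)
    _ ≤ l2.length := List.toFinset_card_le l2

lemma pvCand_nodup (matrix : List (List Int)) (consider : List Int) :
    (pvCandOf matrix consider).Nodup :=
  (PySem.List.nodup_pyRange_one 0 (matrix.length : Int)).filter _

lemma pvCand_subset (matrix : List (List Int)) (consider : List Int) :
    ∀ x ∈ pvCandOf matrix consider, x ∈ consider := by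
  intro x hx
  have := List.of_mem_filter hx
  simpa [List.contains_eq_mem] using this

-- validation: under pvValid all of A's checks are false and B's check is true
lemma pvCheckSq (matrix : List (List Int)) (hv : pvValid matrix) :
    matrix.any (fun row => decide (row.length ≠ matrix.length)) = false := by
  simp only [List.any_eq_false, decide_eq_true_eq]
  intro row hr
  have := hv.1 row hr
  omega

lemma pvEntryGetD (matrix : List (List Int)) (hv : pvValid matrix) (i j : Nat)
    (hi : i < matrix.length) (hj : j < matrix.length) :
    PySem.List.pyGetD (PySem.List.pyGetD matrix (i : Int) []) (j : Int) 0 = 0 ∨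
    PySem.List.pyGetD (PySem.List.pyGetD matrix (i : Int) []) (j : Int) 0 = 1 := by
  rw [PySem.List.pyGetD_natCast, PySem.List.pyGetD_natCast]
  have hrow : matrix.getD i [] = matrix[i] := List.getD_eq_getElem matrix [] hi
  have hrm : matrix[i] ∈ matrix := List.getElem_mem hi
  have hlen : matrix[i].length = matrix.length := hv.1 _ hrm
  have hjr : j < (matrix.getD i []).length := by rw [hrow, hlen]; exact hj
  have hval : (matrix.getD i []).getD j 0 = (matrix.getD i [])[j]'hjr := List.getD_eq_getElem _ 0 hjr
  rw [hval]
  exact hv.2.1 _ (by rw [hrow]; exact hrm) _ (List.getElem_mem hjr)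

lemma pvCheckEnt (matrix : List (List Int)) (hv : pvValid matrix) :
    (List.range matrix.length).any (fun i => (List.range matrix.length).any
      (fun j => !(PySem.List.pyGetD (PySem.List.pyGetD matrix (i : Int) []) (j : Int) 0 == 0 ||
                  PySem.List.pyGetD (PySem.List.pyGetD matrix (i : Int) []) (j : Int) 0 == 1))) = false := by
  simp only [List.any_eq_false, List.mem_range]
  intro i hi hP
  rw [List.any_eq_true] at hP
  obtain ⟨j, hjmem, hP⟩ := hP
  rw [List.mem_range] at hjmem
  rcases pvEntryGetD matrix hv i j hi hjmem with h | h <;> rw [h] at hP <;> simp at hP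

lemma pvCheckDiag (matrix : List (List Int)) (hv : pvValid matrix) :
    (List.range matrix.length).any
      (fun i => decide (PySem.List.pyGetD (PySem.List.pyGetD matrix (i : Int) []) (i : Int) 0 ≠ 0)) = false := by
  simp only [List.any_eq_false, List.mem_range, decide_eq_true_eq, not_not]
  intro i hi
  rw [PySem.List.pyGetD_natCast, PySem.List.pyGetD_natCast]
  exact hv.2.2 i hi

lemma pvCheckB (matrix : List (List Int)) (hv : pvValid matrix) :
    (List.range matrix.length).all (fun i =>
      (List.range matrix.length).all (fun j =>
        PySem.List.pyGetD (PySem.List.pyGetD matrix (i : Int) []) (j : Int) 0 == 0 ||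
        PySem.List.pyGetD (PySem.List.pyGetD matrix (i : Int) []) (j : Int) 0 == 1) &&
      PySem.List.pyGetD (PySem.List.pyGetD matrix (i : Int) []) (i : Int) 0 == 0) = true := by
  simp only [List.all_eq_true, List.mem_range, Bool.and_eq_true]
  intro i hi
  refine ⟨?_, ?_⟩
  · intro j hj
    rcases pvEntryGetD matrix hv i j hi hj with h | h <;> rw [h] <;> decide
  · rw [PySem.List.pyGetD_natCast, PySem.List.pyGetD_natCast, hv.2.2 i hi]
    rfl

-- the winning list of one round: the candidates attaining the maximal wins score
def pvWin (matrix : List (List Int)) (consider : List Int) : List Int :=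
  (pvCandOf matrix consider).filter (fun t => decide (pvWinsOf matrix consider t =
    (PySem.List.max? ((pvCandOf matrix consider).map (pvWinsOf matrix consider)) (fun y => y)).getD 0))

lemma pvWin_nodup (matrix : List (List Int)) (consider : List Int) :
    (pvWin matrix consider).Nodup := (pvCand_nodup matrix consider).filter _

lemma pvWin_subset (matrix : List (List Int)) (consider : List Int) :
    ∀ x ∈ pvWin matrix consider, x ∈ consider := by
  intro x hx
  exact pvCand_subset matrix consider x (List.mem_of_mem_filter hx)

lemma pvCand_nil_nil (matrix : List (List Int)) : pvCandOf matrix [] = [] := by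
  simp [pvCandOf]

-- one round of A's recursion, under a valid matrix
lemma pvGoA_succ (matrix : List (List Int)) (hv : pvValid matrix) (f : Nat) (consider : List Int) :
    championGoA matrix (f + 1) consider =
      (if (pvWin matrix consider).length = 1 then
        "Team " ++ PySem.Int.toStr (PySem.List.pyGetD (pvWin matrix consider) 0 0)
      else if (pvWin matrix consider).length = consider.length then "No champion"
      else championGoA matrix f (pvWin matrix consider)) := by
  simp only [championGoA, pvCheckSq matrix hv, pvCheckEnt matrix hv, pvCheckDiag matrix hv,
    Bool.false_eq_true, if_false]
  rw [pvFoldA_eq matrix consider]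
  by_cases hc : pvCandOf matrix consider = []
  · rw [hc]
    simp only [List.foldl_nil]
    have hW : pvWin matrix consider = [] := by rw [pvWin, hc]; rfl
    rw [hW]
  · rw [pvArgmax_fold (pvWinsOf matrix consider) (pvCandOf matrix consider) hc
      (fun t _ => pvWinsOf_nonneg matrix hv consider t)]
    rw [pvWin]

-- one round of B's while loop
lemma pvGoB_succ (matrix : List (List Int)) (f : Nat) (consider : List Int) :
    championGoB matrix (f + 1) consider =
      (if pvCandOf matrix consider = [] then "No champion"
      else if (pvWin matrix consider).length = 1 then
        "Team " ++ PySem.Int.toStr (PySem.List.pyGetD (pvWin matrix consider) 0 0)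
      else if (pvWin matrix consider).length = consider.length then "No champion"
      else championGoB matrix f (pvWin matrix consider)) := by
  simp only [championGoB]
  have hscores : ((PySem.List.pyRange 0 (matrix.length : Int)).filter
      (fun t => consider.contains t)).map
        (fun t => (t, consider.foldl
          (fun acc i => acc + PySem.List.pyGetD (PySem.List.pyGetD matrix t []) i 0) 0)) =
      (pvCandOf matrix consider).map (fun t => (t, pvWinsOf matrix consider t)) := rfl
  rw [hscores]
  have hnil : ((pvCandOf matrix consider).map (fun t => (t, pvWinsOf matrix consider t)) = []) =
      (pvCandOf matrix consider = []) := by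
    simp [List.map_eq_nil_iff]
  by_cases hc : pvCandOf matrix consider = []
  · rw [hc]
    simp
  · rw [if_neg (by simp [List.map_eq_nil_iff, hc]), if_neg hc]
    have hbest : (((pvCandOf matrix consider).map (fun t => (t, pvWinsOf matrix consider t))).map
        (fun p => p.2)) = (pvCandOf matrix consider).map (pvWinsOf matrix consider) := by
      rw [List.map_map]; rfl
    rw [hbest]
    have hwin : (((pvCandOf matrix consider).map (fun t => (t, pvWinsOf matrix consider t))).filter
        (fun p => decide (p.2 = (PySem.List.max? ((pvCandOf matrix consider).map
          (pvWinsOf matrix consider)) (fun y => y)).getD 0))).map (fun p => p.1) =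
        pvWin matrix consider := by
      rw [List.filter_map, List.map_map]
      have : ((fun p : Int × Int => p.1) ∘ fun t => (t, pvWinsOf matrix consider t)) = id := rfl
      rw [this, List.map_id]
      rfl
    rw [hwin]

-- the two loop bodies agree round for round
lemma pvGo_eq (matrix : List (List Int)) (hv : pvValid matrix) :
    ∀ (fuel : Nat) (consider : List Int), consider.length < fuel →
      championGoA matrix fuel consider = championGoB matrix fuel consider := by
  intro fuel
  induction fuel with
  | zero => intro c h; exact absurd h (Nat.not_lt_zero _)
  | succ f ih =>
    intro consider hlen
    rw [pvGoA_succ matrix hv f consider, pvGoB_succ matrix f consider]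
    by_cases hc : pvCandOf matrix consider = []
    · rw [if_pos hc]
      have hW : pvWin matrix consider = [] := by rw [pvWin, hc]; rfl
      rw [hW]
      simp only [List.length_nil]
      rw [if_neg (by omega : ¬ (0 : Nat) = 1)]
      by_cases hcons : (0 : Nat) = consider.length
      · rw [if_pos hcons]
      · rw [if_neg hcons]
        -- A recurses once more with the empty consider list and then reports no champion
        obtain ⟨f', rfl⟩ : ∃ f', f = f' + 1 := ⟨f - 1, by omega⟩
        rw [pvGoA_succ matrix hv f' []]
        have hW2 : pvWin matrix [] = [] := by rw [pvWin, pvCand_nil_nil]; rfl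
        rw [hW2]
        simp
    · rw [if_neg hc]
      by_cases h1 : (pvWin matrix consider).length = 1
      · rw [if_pos h1, if_pos h1]
      · rw [if_neg h1, if_neg h1]
        by_cases h2 : (pvWin matrix consider).length = consider.length
        · rw [if_pos h2, if_pos h2]
        · rw [if_neg h2, if_neg h2]
          apply ih
          have hle : (pvWin matrix consider).length ≤ consider.length :=
            pvLength_le_of_nodup_subset _ _ (pvWin_nodup matrix consider)
              (pvWin_subset matrix consider)
          omega

theorem champion_team_spec : Claim_equal_champion_team := by
  unfold Claim_equal_champion_team
  intro matrix consider_teams _ hpre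
  unfold Spec_champion_team
  have hv : pvValid matrix := ⟨hpre.1, hpre.2.1, hpre.2.2.1⟩
  unfold champion_team champion_team_alt
  simp only [pvCheckSq matrix hv, pvCheckB matrix hv, Bool.not_true, Bool.false_eq_true, if_false]
  exact pvGo_eq matrix hv _ _ (Nat.lt_succ_self _)
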